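-- pv_equiv track=rewrite | github.com/randomcardboardbox/Megamanx16 | tools/sprite_splitter.py | sort_tiles_ver
-- ===== SOURCE A (Python) =====
-- tile_sizes = [8,16,32,64]
--
-- def sort_tiles_ver(tiles, spr):
--     tile_groups = [[]]
--     start_x = tiles[0][0]
--     start_y = tiles[0][1]
--     last_tile = None
--     for tile in tiles:
--         if(tile[0] != start_x):
--             tile_groups.append([])
--             start_x = tile[0]
--             start_y = tile[1]
--
--         elif(tile[1] != start_y):
--             tile_groups.append([])
--
--         last_tile = tile
--         start_y = tile[1] + tile_sizes[0]
--         tile_groups[len(tile_groups)-1].append(tile)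
--
--     return(tile_groups)
-- ===== SOURCE B (Python) =====
-- tile_sizes = [8, 16, 32, 64]
--
--
-- def sort_tiles_ver(tiles, spr):
--     # Two-pass: find the column-break indices, then slice the list at them.
--     step = tile_sizes[0]
--     cuts = [i for i, (p, t) in enumerate(zip(tiles, tiles[1:]), 1)
--             if t[0] != p[0] or t[1] != p[1] + step]
--     edges = [0] + cuts + [len(tiles)]
--     return [tiles[a:b] for a, b in zip(edges, edges[1:])]
-- ===== Notes on version B (the rewrite author's own statement) =====
-- stated objective: alternative
-- what changed: A builds the groups in one stateful loop carrying start_x/start_y accumulators; B instead computes the list of column-break indices by comparing adjacent tiles (enumerate/zip) and then slices the tile list between consecutive break indices.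
-- outside the precondition, e.g. on sort_tiles_ver([], None): A raises IndexError, B returns [[]]; on sort_tiles_ver([(5,)], None): A raises IndexError, B returns [[(5,)]]
import Mathlib
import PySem

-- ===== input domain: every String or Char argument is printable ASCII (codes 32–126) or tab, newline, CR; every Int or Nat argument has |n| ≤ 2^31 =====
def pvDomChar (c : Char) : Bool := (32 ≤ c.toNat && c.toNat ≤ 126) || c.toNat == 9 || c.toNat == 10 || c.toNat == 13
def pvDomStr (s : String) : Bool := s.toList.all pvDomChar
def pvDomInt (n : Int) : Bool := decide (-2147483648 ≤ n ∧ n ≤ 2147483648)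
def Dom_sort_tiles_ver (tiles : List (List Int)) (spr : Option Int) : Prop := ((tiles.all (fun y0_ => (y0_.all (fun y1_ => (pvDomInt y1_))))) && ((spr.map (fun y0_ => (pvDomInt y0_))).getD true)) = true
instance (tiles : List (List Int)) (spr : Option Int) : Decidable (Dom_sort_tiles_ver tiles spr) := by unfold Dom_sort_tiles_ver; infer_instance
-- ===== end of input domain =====

-- B groups the tiles by first computing the list of column-break indices and then slicing
-- the list between consecutive break indices (two passes), instead of A's single stateful
-- accumulator loop; same return value on Pre_ (objective: alternative decomposition).

def tile_sizes : List Int := [8, 16, 32, 64]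

-- ===== PORT A =====
-- tile_groups[len(tile_groups)-1].append(tile)
def pvAppendLast (gs : List (List (List Int))) (t : List Int) : List (List (List Int)) :=
  gs.dropLast ++ [gs.getLastD [] ++ [t]]

-- the for-loop of A, state = (tile_groups, start_x, start_y); last_tile is dead state and omitted
def pvALoop (tile_groups : List (List (List Int))) (start_x start_y : Int) :
    List (List Int) → List (List (List Int))
  | [] => tile_groups
  | tile :: rest =>
    let t0 := PySem.List.pyGetD tile 0 0      -- tile[0] (in range under Pre_)
    let t1 := PySem.List.pyGetD tile 1 0      -- tile[1] (in range under Pre_)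
    let st :=
      if t0 ≠ start_x then (tile_groups ++ [[]], t0, t1)
      else if t1 ≠ start_y then (tile_groups ++ [[]], start_x, start_y)
      else (tile_groups, start_x, start_y)
    pvALoop (pvAppendLast st.1 tile) st.2.1 (t1 + PySem.List.pyGetD tile_sizes 0 0) rest

def sort_tiles_ver (tiles : List (List Int)) (spr : Option Int) : List (List (List Int)) :=
  let first := PySem.List.pyGetD tiles 0 []   -- tiles[0] (nonempty under Pre_)
  pvALoop [[]] (PySem.List.pyGetD first 0 0) (PySem.List.pyGetD first 1 0) tiles

-- ===== PORT B =====
-- [i for i, (p, t) in enumerate(zip(tiles, tiles[1:]), 1) if t[0] != p[0] or t[1] != p[1] + step]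
def pvBCuts (tiles : List (List Int)) : List Int :=
  (PySem.List.enumerate (tiles.zip (PySem.List.slice tiles (some 1) none)) 1).filterMap
    (fun ipt =>
      if PySem.List.pyGetD ipt.2.2 0 0 ≠ PySem.List.pyGetD ipt.2.1 0 0 ∨
         PySem.List.pyGetD ipt.2.2 1 0 ≠ PySem.List.pyGetD ipt.2.1 1 0 + PySem.List.pyGetD tile_sizes 0 0
      then some ipt.1 else none)

-- edges = [0] + cuts + [len(tiles)]; return [tiles[a:b] for a, b in zip(edges, edges[1:])]
def sort_tiles_ver_alt (tiles : List (List Int)) (spr : Option Int) : List (List (List Int)) :=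
  let cuts := pvBCuts tiles
  let edges := 0 :: (cuts ++ [(tiles.length : Int)])
  (edges.zip (PySem.List.slice edges (some 1) none)).map
    (fun ab => PySem.List.slice tiles (some ab.1) (some ab.2))

-- ===== PRECONDITION & SPEC =====
-- Pre_ excludes exactly the inputs on which A raises IndexError: empty tiles (tiles[0])
-- and tiles with fewer than two coordinates (tile[0]/tile[1]).
def Pre_sort_tiles_ver (tiles : List (List Int)) (spr : Option Int) : Prop :=
  tiles ≠ [] ∧ ∀ t ∈ tiles, 2 ≤ t.length
instance (tiles : List (List Int)) (spr : Option Int) : Decidable (Pre_sort_tiles_ver tiles spr) := by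
  unfold Pre_sort_tiles_ver; infer_instance
def pvWitness_sort_tiles_ver : List (List Int) × Option Int :=
  ([[0, 0], [0, 8], [0, 24], [16, 0]], none)

def Spec_sort_tiles_ver (tiles : List (List Int)) (spr : Option Int) (out : List (List (List Int))) : Prop := out = sort_tiles_ver_alt tiles spr
instance (tiles : List (List Int)) (spr : Option Int) (out : List (List (List Int))) : Decidable (Spec_sort_tiles_ver tiles spr out) := by unfold Spec_sort_tiles_ver; infer_instance

-- ===== CLAIM (what is proved, stated in full; the proofs are below) =====
def Claim_equal_sort_tiles_ver : Prop := ∀ (tiles : List (List Int)) (spr : Option Int), Dom_sort_tiles_ver tiles spr → Pre_sort_tiles_ver tiles spr → Spec_sort_tiles_ver tiles spr (sort_tiles_ver tiles spr)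

-- ===== LEMMAS AND PROOFS =====

-- common recursive grouping specification: given the previous tile p,
-- (pvChunk p rest).1 continues p's group, .2 are the remaining groups
def pvChunk : List Int → List (List Int) → List (List Int) × List (List (List Int))
  | _, [] => ([], [])
  | p, t :: rest =>
    let r := pvChunk t rest
    if PySem.List.pyGetD t 0 0 ≠ PySem.List.pyGetD p 0 0 ∨
       PySem.List.pyGetD t 1 0 ≠ PySem.List.pyGetD p 1 0 + 8
    then ([], (t :: r.1) :: r.2) else (t :: r.1, r.2)

theorem pv_ts0 : PySem.List.pyGetD tile_sizes 0 0 = 8 := by decide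

theorem pvAppendLast_snoc (X : List (List (List Int))) (y : List (List Int)) (t : List Int) :
    pvAppendLast (X ++ [y]) t = X ++ [y ++ [t]] := by
  simp [pvAppendLast]

-- ---- A side ----
theorem pvALoop_eq_chunk (rest : List (List Int)) :
    ∀ (p : List Int) (groups : List (List (List Int))) (g : List (List Int)),
    pvALoop (groups ++ [g]) (PySem.List.pyGetD p 0 0) (PySem.List.pyGetD p 1 0 + 8) rest
      = groups ++ ((g ++ (pvChunk p rest).1) :: (pvChunk p rest).2) := by
  induction rest with
  | nil => intro p groups g; simp [pvALoop, pvChunk]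
  | cons t rest ih =>
    intro p groups g
    rw [pvALoop, pvChunk]
    simp only [pv_ts0]
    by_cases h0 : PySem.List.pyGetD t 0 0 ≠ PySem.List.pyGetD p 0 0
    · rw [if_pos h0, if_pos (Or.inl h0)]
      have h1 : pvAppendLast ((groups ++ [g]) ++ [([] : List (List Int))]) t
          = (groups ++ [g]) ++ [[t]] := by
        simpa using pvAppendLast_snoc (groups ++ [g]) [] t
      simp only [h1]
      rw [ih t (groups ++ [g]) [t]]
      simp
    · rw [if_neg (by simpa using not_not.mp h0)]
      have h0' : PySem.List.pyGetD t 0 0 = PySem.List.pyGetD p 0 0 := not_not.mp h0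
      by_cases h1 : PySem.List.pyGetD t 1 0 ≠ PySem.List.pyGetD p 1 0 + 8
      · rw [if_pos h1, if_pos (Or.inr h1)]
        have h2 : pvAppendLast ((groups ++ [g]) ++ [([] : List (List Int))]) t
            = (groups ++ [g]) ++ [[t]] := by
          simpa using pvAppendLast_snoc (groups ++ [g]) [] t
        simp only [h2]
        rw [← h0', show groups ++ [g] ++ [[t]] = (groups ++ [g]) ++ [[t]] from rfl,
          ih t (groups ++ [g]) [t]]
        simp
      · have h1' : PySem.List.pyGetD t 1 0 = PySem.List.pyGetD p 1 0 + 8 := not_not.mp h1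
        rw [if_neg (by simpa using h1'), if_neg (by simp [h0', h1'])]
        simp only [pvAppendLast_snoc groups g t]
        rw [← h0', ih t groups (g ++ [t])]
        simp

-- ---- B side ----
theorem pv_enumerate_shift {α : Type} (zs : List α) :
    ∀ s : Int, PySem.List.enumerate zs (s + 1)
      = (PySem.List.enumerate zs s).map (fun q => (q.1 + 1, q.2)) := by
  induction zs with
  | nil => intro s; simp [PySem.List.enumerate_nil]
  | cons z zs ih =>
    intro s
    rw [PySem.List.enumerate_cons, PySem.List.enumerate_cons, List.map_cons, ih (s + 1)]

theorem pvBCuts_singleton (p : List Int) : pvBCuts [p] = [] := by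
  simp [pvBCuts, PySem.List.slice_from_one, PySem.List.enumerate_nil]

theorem pvBCuts_cons (p t : List Int) (rest : List (List Int)) :
    pvBCuts (p :: t :: rest)
      = (if PySem.List.pyGetD t 0 0 ≠ PySem.List.pyGetD p 0 0 ∨
            PySem.List.pyGetD t 1 0 ≠ PySem.List.pyGetD p 1 0 + 8
         then [1] else []) ++ (pvBCuts (t :: rest)).map (· + 1) := by
  rw [pvBCuts, pvBCuts]
  rw [PySem.List.slice_from_one, PySem.List.slice_from_one]
  simp only [List.tail_cons, List.zip_cons_cons, PySem.List.enumerate_cons, List.filterMap_cons,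
    pv_ts0]
  rw [pv_enumerate_shift, List.filterMap_map]
  have hfm : ∀ (l : List (Int × (List Int × List Int))),
      l.filterMap ((fun (ipt : Int × (List Int × List Int)) =>
          if PySem.List.pyGetD ipt.2.2 0 0 ≠ PySem.List.pyGetD ipt.2.1 0 0 ∨
             PySem.List.pyGetD ipt.2.2 1 0 ≠ PySem.List.pyGetD ipt.2.1 1 0 + 8
          then some ipt.1 else none) ∘ (fun q => (q.1 + 1, q.2)))
        = (l.filterMap (fun (ipt : Int × (List Int × List Int)) =>
          if PySem.List.pyGetD ipt.2.2 0 0 ≠ PySem.List.pyGetD ipt.2.1 0 0 ∨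
             PySem.List.pyGetD ipt.2.2 1 0 ≠ PySem.List.pyGetD ipt.2.1 1 0 + 8
          then some ipt.1 else none)).map (· + 1) := by
    intro l
    rw [List.map_filterMap]
    refine List.filterMap_congr ?_
    intro q _
    by_cases hq : PySem.List.pyGetD q.2.2 0 0 ≠ PySem.List.pyGetD q.2.1 0 0 ∨
        PySem.List.pyGetD q.2.2 1 0 ≠ PySem.List.pyGetD q.2.1 1 0 + 8
    · simp [hq]
    · simp [hq]
  rw [hfm]
  by_cases hb : PySem.List.pyGetD t 0 0 ≠ PySem.List.pyGetD p 0 0 ∨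
      PySem.List.pyGetD t 1 0 ≠ PySem.List.pyGetD p 1 0 + 8
  · rw [if_pos hb, if_pos hb]; simp
  · rw [if_neg hb, if_neg hb]; simp

theorem pvBCuts_pos (l : List (List Int)) : ∀ x ∈ pvBCuts l, 1 ≤ x := by
  intro x hx
  rw [pvBCuts] at hx
  rw [List.mem_filterMap] at hx
  obtain ⟨q, hq, heq⟩ := hx
  by_cases hc : PySem.List.pyGetD q.2.2 0 0 ≠ PySem.List.pyGetD q.2.1 0 0 ∨
      PySem.List.pyGetD q.2.2 1 0 ≠ PySem.List.pyGetD q.2.1 1 0 + PySem.List.pyGetD tile_sizes 0 0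
  · rw [if_pos hc, Option.some_inj] at heq
    subst heq
    rw [PySem.List.mem_enumerate_iff] at hq
    obtain ⟨k, hk, rfl⟩ := hq
    simp
  · rw [if_neg hc] at heq; exact absurd heq (by simp)

theorem pv_slice_zero_succ {α : Type} (x : α) (l : List α) (b : Int) (hb : 0 ≤ b) :
    PySem.List.slice (x :: l) (some 0) (some (b + 1))
      = x :: PySem.List.slice l (some 0) (some b) := by
  rw [PySem.List.slice_toNat _ (by omega) (by omega), PySem.List.slice_toNat _ (by omega) hb]
  have h1 : (b + 1).toNat = b.toNat + 1 := by omega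
  simp [h1]

theorem pv_slice_shift {α : Type} (x : α) (l : List α) (a b : Int) (ha : 0 ≤ a) (hb : 0 ≤ b) :
    PySem.List.slice (x :: l) (some (a + 1)) (some (b + 1))
      = PySem.List.slice l (some a) (some b) := by
  rw [PySem.List.slice_toNat _ (by omega) (by omega), PySem.List.slice_toNat _ ha hb]
  have h1 : (a + 1).toNat = a.toNat + 1 := by omega
  have h2 : (b + 1).toNat = b.toNat + 1 := by omega
  simp [h1, h2]

-- proof-only view of port B (edges[1:] rewritten to .tail)
def pvZS (l : List (List Int)) : List (List (List Int)) :=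
  let edges := 0 :: (pvBCuts l ++ [(l.length : Int)])
  (edges.zip edges.tail).map (fun ab => PySem.List.slice l (some ab.1) (some ab.2))

theorem pv_alt_eq_ZS (l : List (List Int)) (spr : Option Int) :
    sort_tiles_ver_alt l spr = pvZS l := by
  simp [sort_tiles_ver_alt, pvZS, PySem.List.slice_from_one]

theorem pv_slice01 (p : List Int) (xs : List (List Int)) :
    PySem.List.slice (p :: xs) (some 0) (some 1) = [p] := by
  rw [show (1 : Int) = 0 + 1 by norm_num, pv_slice_zero_succ _ _ 0 le_rfl,
    PySem.List.slice_toNat _ le_rfl le_rfl]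
  simp

theorem pv_ZS_shift (x : List Int) (l : List (List Int)) (e : Int) (E : List Int)
    (hE : ∀ y ∈ e :: E, 0 ≤ y) :
    (((e :: E).map (· + 1)).zip (E.map (· + 1))).map
        (fun ab => PySem.List.slice (x :: l) (some ab.1) (some ab.2))
      = ((e :: E).zip E).map (fun ab => PySem.List.slice l (some ab.1) (some ab.2)) := by
  rw [List.zip_map, List.map_map]
  refine List.map_congr_left ?_
  intro q hq
  obtain ⟨h1, h2⟩ := List.of_mem_zip hq
  obtain ⟨a, b⟩ := q
  exact pv_slice_shift x l a b (hE _ h1) (hE _ (List.mem_cons_of_mem e h2))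

theorem pvZS_eq_chunk (rest : List (List Int)) :
    ∀ p : List Int, pvZS (p :: rest) = (p :: (pvChunk p rest).1) :: (pvChunk p rest).2 := by
  induction rest with
  | nil =>
    intro p
    rw [pvZS, pvChunk]
    simp only [pvBCuts_singleton]
    simp [PySem.List.slice_toNat]
  | cons t rest ih =>
    intro p
    have hDpos : ∀ y ∈ pvBCuts (t :: rest) ++ [((t :: rest).length : Int)], 0 ≤ y := by
      intro y hy
      rcases List.mem_append.mp hy with h | h
      · exact le_trans (by norm_num) (pvBCuts_pos _ y h)
      · simp at h; omega
    have hZS : pvZS (t :: rest)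
        = ((((0 : Int) :: (pvBCuts (t :: rest) ++ [((t :: rest).length : Int)])).zip
              (pvBCuts (t :: rest) ++ [((t :: rest).length : Int)])).map
            (fun ab => PySem.List.slice (t :: rest) (some ab.1) (some ab.2))) := by
      rw [pvZS, List.tail_cons]
    have hcast : (((p :: t :: rest).length : Nat) : Int) = ((t :: rest).length : Int) + 1 := by
      simp
    by_cases hb : PySem.List.pyGetD t 0 0 ≠ PySem.List.pyGetD p 0 0 ∨
        PySem.List.pyGetD t 1 0 ≠ PySem.List.pyGetD p 1 0 + 8
    · have hcuts : pvBCuts (p :: t :: rest)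
          = 1 :: (pvBCuts (t :: rest)).map (· + 1) := by
        rw [pvBCuts_cons, if_pos hb]; rfl
      rw [pvZS, pvChunk, if_pos hb, List.tail_cons]
      have hX : pvBCuts (p :: t :: rest) ++ [(((p :: t :: rest).length : Nat) : Int)]
          = ((0 : Int) :: (pvBCuts (t :: rest) ++ [((t :: rest).length : Int)])).map (· + 1) := by
        rw [hcuts, hcast]; simp
      have hmap1 : (((0 : Int) :: (pvBCuts (t :: rest) ++ [((t :: rest).length : Int)])).map (· + 1))
          = 1 :: ((pvBCuts (t :: rest) ++ [((t :: rest).length : Int)]).map (· + 1)) := by simp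
      rw [hX, hmap1, List.zip_cons_cons, List.map_cons, pv_slice01, ← hmap1]
      rw [pv_ZS_shift p (t :: rest) 0 _ (by
        intro y hy
        rcases List.mem_cons.mp hy with h | h
        · omega
        · exact hDpos y h)]
      rw [← hZS, ih t]
    · have hcuts : pvBCuts (p :: t :: rest)
          = (pvBCuts (t :: rest)).map (· + 1) := by
        rw [pvBCuts_cons, if_neg hb]; rfl
      obtain ⟨d, D', hD⟩ := List.exists_cons_of_ne_nil
        (l := pvBCuts (t :: rest) ++ [((t :: rest).length : Int)]) (by simp)
      have hDpos' : ∀ y ∈ d :: D', 0 ≤ y := by rw [← hD]; exact hDpos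
      have hd0 : 0 ≤ d := hDpos' d List.mem_cons_self
      rw [pvZS, pvChunk, if_neg hb, List.tail_cons]
      have hX : pvBCuts (p :: t :: rest) ++ [(((p :: t :: rest).length : Nat) : Int)]
          = (d :: D').map (· + 1) := by
        rw [hcuts, hcast, ← hD]; simp
      have hmap2 : ((d :: D').map (· + 1)) = (d + 1) :: D'.map (· + 1) := by simp
      rw [hX, hmap2, List.zip_cons_cons, List.map_cons, ← hmap2]
      rw [pv_ZS_shift p (t :: rest) d D' hDpos']
      have hIH := ih t
      rw [hZS, hD, List.zip_cons_cons, List.map_cons] at hIH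
      have h1 := (List.cons.injEq _ _ _ _).mp hIH
      rw [pv_slice_zero_succ p (t :: rest) d hd0, h1.1, h1.2]

-- ===== VERDICT (by name: the statement is the Claim_ definition above) =====
theorem sort_tiles_ver_spec : Claim_equal_sort_tiles_ver := by
  intro tiles spr _hdom hpre
  unfold Spec_sort_tiles_ver
  obtain ⟨hne, _hlen⟩ := hpre
  cases tiles with
  | nil => exact absurd rfl hne
  | cons t rest =>
    rw [pv_alt_eq_ZS, pvZS_eq_chunk]
    rw [sort_tiles_ver]
    simp only [PySem.List.pyGetD_zero_cons]
    rw [pvALoop]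
    simp only [pv_ts0]
    rw [if_neg (by simp), if_neg (by simp)]
    have h1 : pvAppendLast [[]] t = ([] : List (List (List Int))) ++ [[t]] := by
      simp [pvAppendLast]
    rw [h1, pvALoop_eq_chunk rest t [] [t]]
    simp
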